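-- pv_equiv track=rewrite | github.com/alclass/cxlots | fs/jogosfs/jogos_functions.py | get_array_n_repeats_with_m_previous_games
-- ===== SOURCE A (Python) =====
-- def get_array_n_repeats_with_m_previous_games(jogo_as_dezenas, contrajogos):
--   """
--   Suppose the following "small" game history:
--     ( 1, 2, 3, 4, 5, 6)
--     ( 1, 7, 8, 9, 10, 11)
--     ( 1, 12, 13, 14, 15, 16)
--   Now we ask how many repeats there are for the game:
--     ( 1, 7, 13, 19, 25, 26)
--   The repeats are 1, 7 and 13. 1 repeats 3 times, 7 once, 13 once.
--   So, the result should be: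
--     output_array_as_in_documentation = [3,1,1]
--   Why?
--   Because 3 dozens (1, 7 & 13) repeat at least once.
--   The 1 in the second array position is because 1 repeats at least twice.
--   The 1 in the last array position is because 1 repeats 3 times.
--   Because there's no dozen repeating a 4th time, the array ends with its 3rd element.
--   """
--   if jogo_as_dezenas is None or contrajogos is None:
--     return []
--   each_dozen_repeat_dict = {}
--   for dezena in jogo_as_dezenas:
--     each_dozen_repeat_dict[dezena] = 0
--   for contrajogo_as_dezenas in contrajogos:
--     for dezena in contrajogo_as_dezenas:
--       if dezena in jogo_as_dezenas:
--         each_dozen_repeat_dict[dezena] += 1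
--   actual_repeats = each_dozen_repeat_dict.values()
--   return list(filter(lambda e: e > 0, actual_repeats))
-- ===== SOURCE B (Python) =====
-- def get_array_n_repeats_with_m_previous_games(jogo_as_dezenas, contrajogos):
--   if jogo_as_dezenas is None or contrajogos is None:
--     return []
--   result = []
--   for dozen in list(dict.fromkeys(jogo_as_dezenas)):
--     n = 0
--     for contrajogo in contrajogos:
--       for dezena in contrajogo:
--         if dezena == dozen:
--           n += 1
--     if n > 0:
--       result.append(n)
--   return result
-- ===== Notes on version B (the rewrite author's own statement) =====
-- stated objective: simpler
-- what changed: Replaces A's count-table (dict initialized to 0, incremented by a membership-guarded pass over the history, then values filtered) with an ordered dedup of the game followed by a direct per-dozen counting scan of the history, appending each nonzero count.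
import Mathlib
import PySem

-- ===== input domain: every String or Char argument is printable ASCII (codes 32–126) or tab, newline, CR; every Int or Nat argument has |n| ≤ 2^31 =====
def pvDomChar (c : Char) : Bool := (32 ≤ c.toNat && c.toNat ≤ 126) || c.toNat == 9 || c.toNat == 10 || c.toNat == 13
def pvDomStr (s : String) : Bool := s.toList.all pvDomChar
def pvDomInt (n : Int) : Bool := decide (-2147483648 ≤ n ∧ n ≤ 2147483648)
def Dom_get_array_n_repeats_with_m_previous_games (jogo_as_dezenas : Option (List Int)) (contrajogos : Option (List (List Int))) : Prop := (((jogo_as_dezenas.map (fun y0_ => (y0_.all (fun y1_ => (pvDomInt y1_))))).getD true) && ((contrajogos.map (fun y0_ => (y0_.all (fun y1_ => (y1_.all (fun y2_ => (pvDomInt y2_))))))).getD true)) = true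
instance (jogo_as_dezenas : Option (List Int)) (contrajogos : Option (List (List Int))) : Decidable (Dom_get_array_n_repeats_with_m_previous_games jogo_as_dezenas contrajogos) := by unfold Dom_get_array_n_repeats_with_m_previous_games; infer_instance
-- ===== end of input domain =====

-- A counts per-dozen repeats via a dict accumulation pass; B dedups the game and counts each dozen
-- by direct scans of the history, appending nonzero counts — simpler decomposition, same values.


-- ===== PORT A =====
-- 'each_dozen_repeat_dict[dezena] += 1' is ported as Dict.modify with default 0: the membership
-- guard guarantees the key is present (every element of jogo_as_dezenas was inserted), so this is
-- exact (Python's KeyError is unreachable).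
def get_array_n_repeats_with_m_previous_games (jogo_as_dezenas : Option (List Int)) (contrajogos : Option (List (List Int))) : List Int :=
  match jogo_as_dezenas, contrajogos with
  | none, _ => []
  | _, none => []
  | some js, some cjs =>
    let d0 : PySem.Dict Int Int := js.foldl (fun d dezena => d.insert dezena 0) PySem.Dict.empty
    let d : PySem.Dict Int Int :=
      cjs.foldl (fun d contrajogo_as_dezenas =>
        contrajogo_as_dezenas.foldl (fun d dezena =>
          if dezena ∈ js then d.modify dezena 0 (· + 1) else d) d) d0
    d.values.filter (fun e => decide (e > 0))

-- ===== PORT B =====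
def get_array_n_repeats_with_m_previous_games_alt (jogo_as_dezenas : Option (List Int)) (contrajogos : Option (List (List Int))) : List Int :=
  match jogo_as_dezenas, contrajogos with
  | none, _ => []
  | _, none => []
  | some js, some cjs =>
    (PySem.List.dedup js).foldl (fun result dozen =>
      let n : Int :=
        cjs.foldl (fun n contrajogo =>
          contrajogo.foldl (fun n dezena => if dezena == dozen then n + 1 else n) n) 0
      if n > 0 then result ++ [n] else result) []

-- ===== PRECONDITION & SPEC =====
def Spec_get_array_n_repeats_with_m_previous_games (jogo_as_dezenas : Option (List Int)) (contrajogos : Option (List (List Int))) (out : List Int) : Prop := out = get_array_n_repeats_with_m_previous_games_alt jogo_as_dezenas contrajogos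
instance (jogo_as_dezenas : Option (List Int)) (contrajogos : Option (List (List Int))) (out : List Int) : Decidable (Spec_get_array_n_repeats_with_m_previous_games jogo_as_dezenas contrajogos out) := by unfold Spec_get_array_n_repeats_with_m_previous_games; infer_instance

-- ===== CLAIM (what is proved, stated in full; the proofs are below) =====
def Claim_equal_get_array_n_repeats_with_m_previous_games : Prop := ∀ (jogo_as_dezenas : Option (List Int)) (contrajogos : Option (List (List Int))), Dom_get_array_n_repeats_with_m_previous_games jogo_as_dezenas contrajogos → Spec_get_array_n_repeats_with_m_previous_games jogo_as_dezenas contrajogos (get_array_n_repeats_with_m_previous_games jogo_as_dezenas contrajogos)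

-- ===== LEMMAS AND PROOFS =====

-- counting fold = initial + count
theorem pv_count_fold (dz : Int) (l : List Int) (n : Int) :
    l.foldl (fun n x => if x == dz then n + 1 else n) n = n + l.count dz := by
  induction l generalizing n with
  | nil => simp
  | cons x xs ih =>
    simp only [List.foldl_cons, List.count_cons]
    by_cases h : x = dz
    · rw [if_pos (by simp [h]), ih]; simp [h]; ring
    · rw [if_neg (by simp [h]), ih]; simp [h]

-- B's append-if loop as filter-then-map
theorem pv_foldl_append_if (f : Int → Int) (l : List Int) (acc : List Int) :
    l.foldl (fun acc x => if f x > 0 then acc ++ [f x] else acc) acc =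
      acc ++ (l.filter (fun x => decide (f x > 0))).map f := by
  induction l generalizing acc with
  | nil => simp
  | cons x xs ih =>
    simp only [List.foldl_cons, List.filter_cons]
    by_cases h : f x > 0
    · rw [if_pos h, ih]; simp [h]
    · rw [if_neg h, ih]; simp [h]

-- A's increment loop over a flat list: keys preserved, membership of js in keys preserved
theorem pv_keys_step (js : List Int) (l : List Int) (d : PySem.Dict Int Int)
    (hmem : ∀ y ∈ js, d.contains y = true) :
    (l.foldl (fun d x => if x ∈ js then d.modify x 0 (· + 1) else d) d).keys = d.keys ∧
    (∀ y ∈ js, (l.foldl (fun d x => if x ∈ js then d.modify x 0 (· + 1) else d) d).contains y = true) := by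
  induction l generalizing d with
  | nil => exact ⟨rfl, hmem⟩
  | cons x xs ih =>
    simp only [List.foldl_cons]
    by_cases hx : x ∈ js
    · have hc : d.contains x = true := hmem x hx
      have hk : (d.modify x 0 (· + 1)).keys = d.keys := by
        show (d.insert x (d.getD x 0 + 1)).keys = d.keys
        exact PySem.Dict.keys_insert_of_contains _ _ hc
      have hm : ∀ y ∈ js, (d.modify x 0 (· + 1)).contains y = true := by
        intro y hy
        rw [PySem.Dict.contains_modify]
        cases h : y == x <;> simp [hmem y hy]
      have := ih (d.modify x 0 (· + 1)) hm
      simp only [if_pos hx]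
      exact ⟨this.1.trans hk, this.2⟩
    · simp only [if_neg hx]
      exact ih d hmem

-- A's increment loop: getD at a key of js = initial + count in the flat list
theorem pv_getD_step (js : List Int) (l : List Int) (d : PySem.Dict Int Int)
    (k : Int) (hk : k ∈ js) :
    (l.foldl (fun d x => if x ∈ js then d.modify x 0 (· + 1) else d) d).getD k 0 =
      d.getD k 0 + l.count k := by
  induction l generalizing d with
  | nil => simp
  | cons x xs ih =>
    simp only [List.foldl_cons, List.count_cons]
    by_cases hx : x ∈ js
    · rw [if_pos hx, ih]
      rw [PySem.Dict.getD_modify]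
      by_cases hxk : x = k
      · subst hxk; simp; ring
      · simp [hxk, Ne.symm hxk]
    · have hxk : x ≠ k := fun h => hx (h ▸ hk)
      rw [if_neg hx, ih]
      simp [hxk, beq_iff_eq]

-- init loop: keys = dedup js, contains everything of js, getD = 0
theorem pv_init (js : List Int) :
    (js.foldl (fun d dezena => d.insert dezena 0) (PySem.Dict.empty : PySem.Dict Int Int)).keys = PySem.List.dedup js ∧
    (∀ k, (js.foldl (fun d dezena => d.insert dezena 0) (PySem.Dict.empty : PySem.Dict Int Int)).getD k 0 = 0) := by
  constructor
  · rw [PySem.Dict.keys_foldl_insert]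
    simp [PySem.Dict.keys_empty, PySem.Set.update_nil_left, PySem.List.dedup_eq_ofList]
  · intro k
    induction js using List.reverseRecOn with
    | nil => simp [PySem.Dict.getD_empty]
    | append_singleton xs x ih =>
      rw [List.foldl_append, List.foldl_cons, List.foldl_nil, PySem.Dict.getD_insert]
      split <;> simp [ih]

theorem get_array_main (js : List Int) (cjs : List (List Int)) :
    get_array_n_repeats_with_m_previous_games (some js) (some cjs) =
      get_array_n_repeats_with_m_previous_games_alt (some js) (some cjs) := by
  unfold get_array_n_repeats_with_m_previous_games get_array_n_repeats_with_m_previous_games_alt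
  simp only
  set d0 := js.foldl (fun d dezena => d.insert dezena 0) (PySem.Dict.empty : PySem.Dict Int Int) with hd0
  have hinit := pv_init js
  have hnd : d0.keys.Nodup := by
    rw [hinit.1, PySem.List.dedup_eq_ofList]; exact PySem.Set.nodup_ofList js
  have hcont : ∀ y ∈ js, d0.contains y = true := by
    intro y hy
    rw [PySem.Dict.contains_iff_mem_keys, hinit.1, PySem.List.mem_dedup]
    exact hy
  -- flatten the nested loop on A's side
  have hflat : cjs.foldl (fun d contrajogo_as_dezenas =>
      contrajogo_as_dezenas.foldl (fun d dezena =>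
        if dezena ∈ js then d.modify dezena 0 (· + 1) else d) d) d0 =
      cjs.flatten.foldl (fun d x => if x ∈ js then d.modify x 0 (· + 1) else d) d0 := by
    rw [List.foldl_flatten]
  rw [hflat]
  set d := cjs.flatten.foldl (fun d x => if x ∈ js then d.modify x 0 (· + 1) else d) d0 with hd
  have hstep := pv_keys_step js cjs.flatten d0 hcont
  have hdk : d.keys = PySem.List.dedup js := hstep.1.trans hinit.1
  have hdnd : d.keys.Nodup := by rw [hdk, PySem.List.dedup_eq_ofList]; exact PySem.Set.nodup_ofList js
  have hvals : d.values = d.keys.map (fun k => d.getD k 0) :=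
    PySem.Dict.values_eq_map_keys d hdnd 0
  have hgetD : ∀ k ∈ js, d.getD k 0 = (cjs.flatten.count k : Int) := by
    intro k hk
    rw [hd, pv_getD_step js cjs.flatten d0 k hk, hinit.2 k, zero_add]
  -- B's side: rewrite the inner count fold, then the append-if fold
  have hB : (PySem.List.dedup js).foldl (fun result dozen =>
      let n : Int := cjs.foldl (fun n contrajogo =>
          contrajogo.foldl (fun n dezena => if dezena == dozen then n + 1 else n) n) 0
      if n > 0 then result ++ [n] else result) [] =
      ((PySem.List.dedup js).filter (fun k => decide ((cjs.flatten.count k : Int) > 0))).map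
        (fun k => (cjs.flatten.count k : Int)) := by
    have hcnt : ∀ dozen : Int, cjs.foldl (fun n contrajogo =>
        contrajogo.foldl (fun n dezena => if dezena == dozen then n + 1 else n) n) 0 =
        (cjs.flatten.count dozen : Int) := by
      intro dozen
      rw [← List.foldl_flatten, pv_count_fold]
      simp
    simp only [hcnt]
    rw [pv_foldl_append_if (fun k => (cjs.flatten.count k : Int)) (PySem.List.dedup js) []]
    simp
  rw [hB, hvals, hdk]
  have hmapeq : (PySem.List.dedup js).map (fun k => d.getD k 0) =
      (PySem.List.dedup js).map (fun k => (cjs.flatten.count k : Int)) :=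
    List.map_congr_left (fun k hk => hgetD k ((PySem.List.mem_dedup _ _).mp hk))
  rw [hmapeq, List.filter_map]
  rfl

-- ===== VERDICT (by name: the statement is the Claim_ definition above) =====
theorem get_array_n_repeats_with_m_previous_games_spec : Claim_equal_get_array_n_repeats_with_m_previous_games := by
  intro j c _
  unfold Spec_get_array_n_repeats_with_m_previous_games
  match j, c with
  | none, _ => rfl
  | some js, none => rfl
  | some js, some cjs => exact get_array_main js cjs
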